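-- pv_equiv track=rewrite | github.com/stschwark/advent-of-code-2018 | puzzle/day08.py | value_of
-- ===== SOURCE A (Python) =====
-- def value_of(values):
--     children = values.pop(0)
--     meta_entries = values.pop(0)
--     child_values = [value_of(values) for _ in range(children)]
--
--     if children == 0:
--         return sum([values.pop(0) for _ in range(meta_entries)])
--     else:
--         meta = [values.pop(0) for _ in range(meta_entries)]
--         return sum([child_values[i - 1] if 0 <= i - 1 < len(child_values) else 0 for i in meta])
-- ===== SOURCE B (Python) =====
-- def _node_value(orig, metas, kids):
--     if orig == 0:
--         return sum(metas)
--     return sum(kids[i - 1] if 0 <= i - 1 < len(kids) else 0 for i in metas)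
--
--
-- def value_of(values):
--     children = values.pop(0)
--     meta_entries = values.pop(0)
--     stack = [[children, children, meta_entries, []]]  # [remaining, orig, meta_count, kids]
--     while True:
--         frame = stack[-1]
--         if frame[0] > 0:
--             frame[0] -= 1
--             c = values.pop(0)
--             m = values.pop(0)
--             stack.append([c, c, m, []])
--         else:
--             stack.pop()
--             metas = [values.pop(0) for _ in range(frame[2])]
--             v = _node_value(frame[1], metas, frame[3])
--             if not stack:
--                 return v
--             stack[-1][3].append(v)
-- ===== Notes on version B (the rewrite author's own statement) =====
-- stated objective: alternative
-- what changed: A's recursion over the mutated list is replaced by an iterative explicit stack of frames (remaining children, original count, meta count, accumulated child values) that pops the same prefix of `values` in the same order.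
import Mathlib
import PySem

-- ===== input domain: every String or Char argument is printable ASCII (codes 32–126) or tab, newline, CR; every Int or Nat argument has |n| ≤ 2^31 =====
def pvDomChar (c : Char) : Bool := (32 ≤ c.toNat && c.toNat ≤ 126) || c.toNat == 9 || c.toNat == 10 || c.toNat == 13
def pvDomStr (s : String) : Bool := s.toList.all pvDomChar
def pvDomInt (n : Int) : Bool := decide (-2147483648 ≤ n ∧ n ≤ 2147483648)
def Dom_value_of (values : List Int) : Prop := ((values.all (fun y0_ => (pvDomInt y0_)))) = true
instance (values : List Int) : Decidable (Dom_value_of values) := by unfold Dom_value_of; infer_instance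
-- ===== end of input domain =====

-- B replaces A's recursion by an explicit stack of frames (same pop order, so the
-- observable mutation of `values` is identical); objective: alternative decomposition.
-- Both Pythons mutate `values` in place by popping the consumed prefix; the ports are pure
-- and the claim is about the RETURN value (the two Pythons perform the identical mutation).

-- `[values.pop(0) for _ in range(n)]`: pops the first n elements (IndexError → none)
def popN (n : Nat) (vs : List Int) : Option (List Int × List Int) :=
  if n ≤ vs.length then some (vs.take n, vs.drop n) else none

-- ===== PORT A =====
-- A is recursive on a mutated list; the port threads the list, returning (value, leftover).
-- `none` = IndexError (pop from an exhausted list); the fuel only makes the mutual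
-- recursion structural — `values.length + 1` always suffices (each level consumes ≥ 2).
mutual
def valueOfA : Nat → List Int → Option (Int × List Int)
  | 0, _ => none
  | _ + 1, [] => none                       -- values.pop(0) raises
  | _ + 1, [_] => none                      -- second pop(0) raises
  | f + 1, c :: m :: vs =>
    match childLoopA f c.toNat vs with      -- child_values = [value_of(values) for _ in range(children)]
    | none => none
    | some (cvals, vs1) =>
      match popN m.toNat vs1 with           -- the meta pops of either branch
      | none => none
      | some (metas, rest) =>
        if c = 0 then some (metas.sum, rest)
        else some ((metas.map (fun i =>
          if 0 ≤ i - 1 ∧ i - 1 < (cvals.length : Int) then cvals.getD (i - 1).toNat 0 else 0)).sum, rest)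
termination_by f _ => (f, 0)

def childLoopA : Nat → Nat → List Int → Option (List Int × List Int)
  | _, 0, vs => some ([], vs)
  | f, n + 1, vs =>
    match valueOfA f vs with
    | none => none
    | some (v, vs') =>
      match childLoopA f n vs' with
      | none => none
      | some (cvals, vs'') => some (v :: cvals, vs'')
termination_by f n _ => (f, n + 1)
end

def value_of (values : List Int) : Int :=
  match valueOfA (values.length + 1) values with
  | some (v, _) => v
  | none => 0          -- unreachable under Pre_ (A raises IndexError)

-- ===== PORT B =====
def nodeVal (orig : Int) (metas kids : List Int) : Int :=
  if orig = 0 then metas.sum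
  else (metas.map (fun i =>
    if 0 ≤ i - 1 ∧ i - 1 < (kids.length : Int) then kids.getD (i - 1).toNat 0 else 0)).sum

-- frame = (remaining children, original children count, meta count, child values so far);
-- the meta pops `popN` are written out as take/drop so the recursive call is on `vs.drop _`
def loopB : List Int → List (Int × Int × Int × List Int) → Option Int
  | _, [] => none                            -- unreachable: the loop returns before the stack empties
  | vs, (rem, orig, mc, kids) :: stk =>
    if 0 < rem then
      match vs with
      | c :: m :: vs' => loopB vs' ((c, c, m, ([] : List Int)) :: (rem - 1, orig, mc, kids) :: stk)
      | _ => none                            -- values.pop(0) raises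
    else
      if mc.toNat ≤ vs.length then           -- metas = [values.pop(0) for _ in range(frame[2])]
        match stk with
        | [] => some (nodeVal orig (vs.take mc.toNat) kids)
        | (r2, o2, m2, k2) :: stk' =>
            loopB (vs.drop mc.toNat) ((r2, o2, m2, k2 ++ [nodeVal orig (vs.take mc.toNat) kids]) :: stk')
      else none                              -- values.pop(0) raises
  termination_by vs stk => vs.length + stk.length
  decreasing_by
  · simp; omega
  · simp; omega

def value_of_alt (values : List Int) : Int :=
  match values with
  | c :: m :: vs => (loopB vs [(c, c, m, ([] : List Int))]).getD 0
  | _ => 0             -- unreachable under Pre_ (B raises IndexError)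

-- ===== PRECONDITION & SPEC =====
-- Pre_ excludes exactly the inputs on which A (and B) raise IndexError from pop(0):
-- `values` must have a well-formed serialized tree as a prefix. `shapeChk` decides
-- membership in that serialization grammar (child count, meta count, enough entries);
-- it computes no value. The fuel `values.length + 1` always suffices: every nesting
-- level consumes at least two entries.
def skipN (n : Nat) (vs : List Int) : Option (List Int) :=
  if n ≤ vs.length then some (vs.drop n) else none

-- n successive applications of g, short-circuiting on failure
def iterOpt (g : List Int → Option (List Int)) : Nat → List Int → Option (List Int)
  | 0, vs => some vs
  | n + 1, vs =>
    match g vs with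
    | none => none
    | some vs' => iterOpt g n vs'

def shapeChk : Nat → List Int → Option (List Int)
  | 0, _ => none
  | _ + 1, [] => none
  | _ + 1, [_] => none
  | f + 1, c :: m :: vs => (iterOpt (shapeChk f) c.toNat vs).bind (skipN m.toNat)

def Pre_value_of (values : List Int) : Prop :=
  (shapeChk (values.length + 1) values).isSome = true
instance (values : List Int) : Decidable (Pre_value_of values) := by
  unfold Pre_value_of; infer_instance

def pvWitness_value_of : List Int := [2, 3, 0, 3, 10, 11, 12, 1, 1, 0, 1, 99, 2, 1, 1, 2]

def Spec_value_of (values : List Int) (out : Int) : Prop := out = value_of_alt values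
instance (values : List Int) (out : Int) : Decidable (Spec_value_of values out) := by
  unfold Spec_value_of; infer_instance

-- ===== CLAIM (what is proved, stated in full; the proofs are below) =====
def Claim_equal_value_of : Prop := ∀ (values : List Int), Dom_value_of values → Pre_value_of values → Spec_value_of values (value_of values)

-- ===== LEMMAS AND PROOFS =====

-- continuation after a node's value v is delivered with leftover values vs2
def contFrame (vs2 : List Int) (v : Int) (stk : List (Int × Int × Int × List Int)) : Option Int :=
  match stk with
  | [] => some v
  | (r, o, m, k) :: t => loopB vs2 ((r, o, m, k ++ [v]) :: t)

-- finishing a frame: pop the metas, compute the value, deliver it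
def finishFrame (orig mc : Int) (kids vs1 : List Int) (stk : List (Int × Int × Int × List Int)) : Option Int :=
  match popN mc.toNat vs1 with
  | none => none
  | some (metas, vs2) => contFrame vs2 (nodeVal orig metas kids) stk

def NodeP (f : Nat) : Prop :=
  ∀ c m vs v rest, valueOfA f (c :: m :: vs) = some (v, rest) →
    ∀ stk, loopB vs ((c, c, m, ([] : List Int)) :: stk) = contFrame rest v stk

lemma loopB_pop {rem orig mc : Int} {kids vs stk} (h : ¬ 0 < rem) :
    loopB vs ((rem, orig, mc, kids) :: stk) = finishFrame orig mc kids vs stk := by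
  rw [loopB.eq_def]
  dsimp only
  rw [if_neg h]
  unfold finishFrame popN
  by_cases hle : mc.toNat ≤ vs.length
  · rw [if_pos hle, if_pos hle]
    cases stk <;> rfl
  · rw [if_neg hle, if_neg hle]

lemma loopB_push {rem orig mc : Int} {kids c m vs stk} (h : 0 < rem) :
    loopB (c :: m :: vs) ((rem, orig, mc, kids) :: stk) =
      loopB vs ((c, c, m, ([] : List Int)) :: (rem - 1, orig, mc, kids) :: stk) := by
  rw [loopB.eq_def]
  dsimp only
  rw [if_pos h]

lemma valueOfA_shape {f vs r} (h : valueOfA f vs = some r) :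
    ∃ c m vs', vs = c :: m :: vs' := by
  match f, vs with
  | 0, _ => simp [valueOfA] at h
  | _ + 1, [] => simp [valueOfA] at h
  | _ + 1, [_] => simp [valueOfA] at h
  | _ + 1, c :: m :: vs' => exact ⟨c, m, vs', rfl⟩

lemma kidsP {f : Nat} (hN : NodeP f) :
    ∀ n vs cvals vs1, childLoopA f n vs = some (cvals, vs1) →
    ∀ (rem orig mc : Int) (kids : List Int) stk, rem.toNat = n →
      loopB vs ((rem, orig, mc, kids) :: stk) = finishFrame orig mc (kids ++ cvals) vs1 stk := by
  intro n
  induction n with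
  | zero =>
    intro vs cvals vs1 h rem orig mc kids stk hrem
    rw [childLoopA] at h
    cases h
    rw [loopB_pop (by omega)]
    simp
  | succ n ih =>
    intro vs cvals vs1 h rem orig mc kids stk hrem
    rw [childLoopA] at h
    cases hv : valueOfA f vs with
    | none => rw [hv] at h; cases h
    | some p =>
      obtain ⟨v, vs'⟩ := p
      rw [hv] at h
      dsimp only at h
      cases hk : childLoopA f n vs' with
      | none => rw [hk] at h; cases h
      | some q =>
        obtain ⟨cvals', vs''⟩ := q
        rw [hk] at h
        dsimp only at h
        rw [Option.some_inj, Prod.mk.injEq] at h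
        obtain ⟨hc, hv1⟩ := h
        subst hc; subst hv1
        obtain ⟨c', m', vs0, rfl⟩ := valueOfA_shape hv
        rw [loopB_push (by omega), hN c' m' vs0 v vs' hv]
        have hcf : contFrame vs' v ((rem - 1, orig, mc, kids) :: stk) =
            loopB vs' ((rem - 1, orig, mc, kids ++ [v]) :: stk) := rfl
        rw [hcf, ih vs' cvals' vs'' hk (rem - 1) orig mc (kids ++ [v]) stk (by omega)]
        simp [List.append_assoc]

lemma nodeP : ∀ f, NodeP f := by
  intro f
  induction f with
  | zero => intro c m vs v rest h; simp [valueOfA] at h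
  | succ f ih =>
    intro c m vs v rest h stk
    rw [valueOfA] at h
    cases hk : childLoopA f c.toNat vs with
    | none => rw [hk] at h; cases h
    | some p =>
      obtain ⟨cvals, vs1⟩ := p
      rw [hk] at h
      dsimp only at h
      cases hp : popN m.toNat vs1 with
      | none => rw [hp] at h; cases h
      | some q =>
        obtain ⟨metas, vs2⟩ := q
        rw [hp] at h
        dsimp only at h
        rw [kidsP ih c.toNat vs cvals vs1 hk c c m [] stk rfl]
        unfold finishFrame
        rw [hp]
        split at h <;>
        · rw [Option.some_inj, Prod.mk.injEq] at h
          obtain ⟨hv, hrest⟩ := h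
          subst hv; subst hrest
          dsimp only
          simp [nodeVal, *]

lemma skipN_popN {n : Nat} {vs rest} (h : skipN n vs = some rest) :
    popN n vs = some (vs.take n, rest) := by
  unfold skipN at h
  unfold popN
  split at h <;> simp_all

def ShapeP (f : Nat) : Prop :=
  ∀ vs rest, shapeChk f vs = some rest → ∃ v, valueOfA f vs = some (v, rest)

lemma kidsSound {f : Nat} (hS : ShapeP f) :
    ∀ n vs vs1, iterOpt (shapeChk f) n vs = some vs1 →
      ∃ cvals, childLoopA f n vs = some (cvals, vs1) := by
  intro n
  induction n with
  | zero =>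
    intro vs vs1 h
    rw [iterOpt, Option.some_inj] at h
    subst h
    exact ⟨[], by rw [childLoopA]⟩
  | succ n ih =>
    intro vs vs1 h
    rw [iterOpt] at h
    cases hv : shapeChk f vs with
    | none => rw [hv] at h; cases h
    | some vs' =>
      rw [hv] at h
      dsimp only at h
      obtain ⟨v, hva⟩ := hS vs vs' hv
      obtain ⟨cvals, hk⟩ := ih vs' vs1 h
      exact ⟨v :: cvals, by rw [childLoopA, hva]; dsimp only; rw [hk]⟩

lemma shapeSound : ∀ f, ShapeP f := by
  intro f
  induction f with
  | zero => intro vs rest h; simp [shapeChk] at h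
  | succ f ih =>
    intro vs rest h
    match vs with
    | [] => simp [shapeChk] at h
    | [_] => simp [shapeChk] at h
    | c :: m :: vs =>
      rw [shapeChk] at h
      cases hk : iterOpt (shapeChk f) c.toNat vs with
      | none => simp [hk] at h
      | some vs1 =>
        rw [hk] at h
        rw [show (some vs1).bind (skipN m.toNat) = skipN m.toNat vs1 from rfl] at h
        obtain ⟨cvals, hca⟩ := kidsSound ih c.toNat vs vs1 hk
        have hp := skipN_popN h
        rw [valueOfA, hca]
        dsimp only
        rw [hp]
        dsimp only
        split
        · exact ⟨_, rfl⟩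
        · exact ⟨_, rfl⟩

-- ===== VERDICT (by name: the statement is the Claim_ definition above) =====
theorem value_of_spec : Claim_equal_value_of := by
  intro values _ hPre
  unfold Spec_value_of
  unfold Pre_value_of at hPre
  rw [Option.isSome_iff_exists] at hPre
  obtain ⟨rest, hsh⟩ := hPre
  obtain ⟨v, hA⟩ := shapeSound (values.length + 1) values rest hsh
  obtain ⟨c, m, vs, rfl⟩ := valueOfA_shape hA
  have hB := nodeP ((c :: m :: vs).length + 1) c m vs v rest hA ([])
  unfold value_of value_of_alt
  rw [hA]
  dsimp only
  rw [hB]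
  rfl
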